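-- pv_equiv track=rewrite | github.com/mreishus/aoc | 2020/python2020/aoc/day10.py | part1
-- ===== SOURCE A (Python) =====
-- def part1(data):
--     voltages = set(data)
--     highest = max(data)
--
--     volts = 0
--     d1 = 0
--     d2 = 0
--     d3 = 0
--     while volts < highest:
--         if (volts + 1) in voltages:
--             d1 += 1
--             volts += 1
--             continue
--         if (volts + 2) in voltages:
--             d2 += 1
--             volts += 2
--             continue
--         if (volts + 3) in voltages:
--             d3 += 1
--             volts += 3
--             continue
--     d3 += 1
--     return d1 * d3
-- ===== SOURCE B (Python) =====
-- def part1(data):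
--     s = sorted({x for x in data if x > 0})
--     d1 = 0
--     d3 = 0
--     prev = 0
--     for v in s:
--         gap = v - prev
--         if gap == 1:
--             d1 += 1
--         elif gap == 3:
--             d3 += 1
--         prev = v
--     return d1 * (d3 + 1)
-- ===== Notes on version B (the rewrite author's own statement) =====
-- stated objective: simpler
-- what changed: Replaces A's greedy joltage walk over a membership set (stepping +1/+2/+3 from 0 up to max) by sorting the distinct positive adapters once and counting consecutive differences of 1 and 3 in a single pass; Pre_ excludes inputs where A raises (empty list) or loops forever (a gap larger than 3 in the positive adapter chain).
-- outside the precondition, e.g. on part1([]): A raises ValueError, B returns 0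
import Mathlib
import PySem

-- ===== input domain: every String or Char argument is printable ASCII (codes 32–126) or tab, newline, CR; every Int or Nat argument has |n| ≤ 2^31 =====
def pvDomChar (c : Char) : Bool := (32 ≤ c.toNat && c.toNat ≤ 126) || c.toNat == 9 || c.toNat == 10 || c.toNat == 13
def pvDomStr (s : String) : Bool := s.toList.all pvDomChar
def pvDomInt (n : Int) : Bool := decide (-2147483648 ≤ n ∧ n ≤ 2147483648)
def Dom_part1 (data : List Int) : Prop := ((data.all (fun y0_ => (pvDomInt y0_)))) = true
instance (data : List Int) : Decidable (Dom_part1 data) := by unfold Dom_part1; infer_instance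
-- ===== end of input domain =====

-- B replaces A's greedy +1/+2/+3 walk over a membership set by one sorted pass over the
-- distinct positive adapters, counting consecutive gaps of 1 and 3 (objective: simpler).

-- ===== PORT A =====
-- A's while loop advances volts by at least 1 per iteration while volts < highest, so
-- 'highest.toNat' steps of fuel suffice; the fuel-0 / no-step fallthrough returns the
-- current counters, which Pre_ makes unreachable (there Python would loop forever).
def part1Loop (voltages : List Int) (highest : Int) :
    Nat → Int → Int → Int → Int → Int × Int × Int
  | 0, _, d1, d2, d3 => (d1, d2, d3)
  | fuel+1, volts, d1, d2, d3 =>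
    if volts < highest then
      if PySem.Set.contains voltages (volts + 1) then
        part1Loop voltages highest fuel (volts + 1) (d1 + 1) d2 d3
      else if PySem.Set.contains voltages (volts + 2) then
        part1Loop voltages highest fuel (volts + 2) d1 (d2 + 1) d3
      else if PySem.Set.contains voltages (volts + 3) then
        part1Loop voltages highest fuel (volts + 3) d1 d2 (d3 + 1)
      else (d1, d2, d3)
    else (d1, d2, d3)

def part1 (data : List Int) : Int :=
  let voltages := PySem.Set.ofList data
  match PySem.List.max? data (fun x => x) with
  | none => 0   -- Python raises ValueError here (max of empty list); excluded by Pre_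
  | some highest =>
    match part1Loop voltages highest highest.toNat 0 0 0 0 with
    | (d1, _, d3) => d1 * (d3 + 1)

-- ===== PORT B =====
def part1_alt (data : List Int) : Int :=
  let s := PySem.List.sorted (PySem.Set.ofList (data.filter (fun x => decide (0 < x))))
            (fun x => x) false
  match s.foldl
      (fun (acc : Int × Int × Int) v =>
        match acc with
        | (d1, d3, prev) =>
          let gap := v - prev
          if gap = 1 then (d1 + 1, d3, v)
          else if gap = 3 then (d1, d3 + 1, v)
          else (d1, d3, v))
      (0, 0, 0) with
  | (d1, d3, _) => d1 * (d3 + 1)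

-- ===== PRECONDITION & SPEC =====
-- Pre_ excludes exactly the inputs where Python A does not return: the empty list (max([])
-- raises ValueError) and lists whose chain of distinct positive values, started from 0,
-- has a gap greater than 3 — there A's while loop makes no progress and loops forever.
def Pre_part1 (data : List Int) : Prop :=
  data ≠ [] ∧ ∀ x ∈ data, 3 < x → ∃ y ∈ data, x - 3 ≤ y ∧ y < x
instance (data : List Int) : Decidable (Pre_part1 data) := by unfold Pre_part1; infer_instance

def pvWitness_part1 : List Int := [1, 3, 4, 7]

def Spec_part1 (data : List Int) (out : Int) : Prop := out = part1_alt data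
instance (data : List Int) (out : Int) : Decidable (Spec_part1 data out) := by unfold Spec_part1; infer_instance

-- ===== CLAIM (what is proved, stated in full; the proofs are below) =====
def Claim_equal_part1 : Prop :=
  ∀ (data : List Int), Dom_part1 data → Pre_part1 data → Spec_part1 data (part1 data)

-- ===== LEMMAS AND PROOFS =====

-- number of adjacent gaps equal to k along the chain prev :: s
def gapCount (k : Int) : Int → List Int → Int
  | _, [] => 0
  | prev, h :: t => (if h - prev = k then 1 else 0) + gapCount k h t

lemma foldB_eq (s : List Int) : ∀ (d1 d3 prev : Int),
    s.foldl
      (fun (acc : Int × Int × Int) v =>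
        match acc with
        | (d1, d3, prev) =>
          let gap := v - prev
          if gap = 1 then (d1 + 1, d3, v)
          else if gap = 3 then (d1, d3 + 1, v)
          else (d1, d3, v))
      (d1, d3, prev)
    = (d1 + gapCount 1 prev s, d3 + gapCount 3 prev s, s.getLastD prev) := by
  induction s with
  | nil => intro d1 d3 prev; simp [gapCount]
  | cons h t ih =>
    intro d1 d3 prev
    simp only [List.foldl_cons, List.getLastD_cons]
    by_cases h1 : h - prev = 1
    · simp [h1, ih, gapCount]; omega
    · by_cases h3 : h - prev = 3
      · simp [h3, ih, gapCount]; omega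
      · simp [h1, h3, ih, gapCount]

lemma loopA_eq (vs : List Int)
    (HP : ∀ x : Int, x ∈ vs → 3 < x → ∃ y ∈ vs, x - 3 ≤ y ∧ y < x) :
    ∀ (s : List Int) (fuel : Nat) (prev highest d1 d2 d3 : Int),
    0 ≤ prev →
    s.Pairwise (· < ·) →
    (∀ v ∈ s, prev < v) →
    (∀ v : Int, prev < v → (v ∈ vs ↔ v ∈ s)) →
    highest = (prev :: s).getLast (by simp) →
    highest - prev ≤ (fuel : Int) →
    part1Loop vs highest fuel prev d1 d2 d3
      = (d1 + gapCount 1 prev s, d2 + gapCount 2 prev s, d3 + gapCount 3 prev s) := by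
  intro s
  induction s with
  | nil =>
    intro fuel prev highest d1 d2 d3 hprev hpair hgt hmem hlast hfuel
    have hh : highest = prev := by simpa using hlast
    cases fuel with
    | zero => simp [part1Loop, gapCount]
    | succ f => simp [part1Loop, hh, gapCount]
  | cons h t ih =>
    intro fuel prev highest d1 d2 d3 hprev hpair hgt hmem hlast hfuel
    have hph : prev < h := hgt h (by simp)
    have htgt : ∀ v ∈ t, h < v := by
      intro v hv; exact (List.pairwise_cons.mp hpair).1 v hv
    have hpair' : t.Pairwise (· < ·) := (List.pairwise_cons.mp hpair).2
    have hlast' : highest = (h :: t).getLast (by simp) := by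
      rw [hlast]; exact List.getLast_cons_cons
    have hhimem : highest ∈ h :: t := hlast' ▸ List.getLast_mem _
    have hph2 : prev < highest := by
      rcases List.mem_cons.mp hhimem with rfl | hm
      · exact hph
      · exact lt_trans hph (htgt _ hm)
    -- h ∈ vs
    have hhvs : h ∈ vs := (hmem h hph).mpr (by simp)
    -- the gap h - prev is between 1 and 3
    have hgap : h - prev ≤ 3 := by
      by_cases h3 : 3 < h
      · obtain ⟨y, hyvs, hy1, hy2⟩ := HP h hhvs h3
        by_cases hyp : prev < y
        · have : y ∈ h :: t := (hmem y hyp).mp hyvs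
          rcases List.mem_cons.mp this with rfl | hm
          · omega
          · have := htgt y hm; omega
        · omega
      · omega
    -- a value v with prev < v < h is not in vs
    have hnot : ∀ v : Int, prev < v → v < h → ¬ v ∈ vs := by
      intro v hv1 hv2 hvvs
      have : v ∈ h :: t := (hmem v hv1).mp hvvs
      rcases List.mem_cons.mp this with rfl | hm
      · omega
      · have := htgt v hm; omega
    -- fuel must be positive
    cases fuel with
    | zero => exfalso; simp at hfuel; omega
    | succ f =>
      have hmem' : ∀ v : Int, h < v → (v ∈ vs ↔ v ∈ t) := by
        intro v hv
        rw [hmem v (lt_trans hph hv)]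
        constructor
        · intro hm; rcases List.mem_cons.mp hm with rfl | hm
          · omega
          · exact hm
        · intro hm; exact List.mem_cons_of_mem _ hm
      have hfuel' : highest - h ≤ (f : Int) := by
        have : ((f : Int) + 1) = ((f + 1 : Nat) : Int) := by push_cast; ring
        omega
      have hgt' : ∀ v ∈ t, h < v := htgt
      have hprev' : (0:Int) ≤ h := by omega
      -- case on the actual gap
      have hgap1 : h - prev = 1 ∨ h - prev = 2 ∨ h - prev = 3 := by omega
      have cmem : ∀ k : Int, prev < k → k < h → PySem.Set.contains vs k = false := by
        intro k hk1 hk2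
        exact Bool.eq_false_iff.mpr
          (fun hc => hnot k hk1 hk2 ((PySem.Set.contains_iff vs k).mp hc))
      have chit : PySem.Set.contains vs h = true := (PySem.Set.contains_iff vs h).mpr hhvs
      rcases hgap1 with hg | hg | hg
      · have heq : prev + 1 = h := by omega
        simp only [part1Loop, if_pos hph2, heq, chit, if_true]
        rw [ih f h highest (d1+1) d2 d3 hprev' hpair' hgt' hmem' hlast' hfuel']
        simp only [gapCount, hg, Prod.mk.injEq]
        refine ⟨by split_ifs <;> omega, by split_ifs <;> omega, by split_ifs <;> omega⟩
      · have heq : prev + 2 = h := by omega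
        have c1 := cmem (prev + 1) (by omega) (by omega)
        simp only [part1Loop, if_pos hph2, heq, c1, chit, if_true, Bool.false_eq_true,
          if_false]
        rw [ih f h highest d1 (d2+1) d3 hprev' hpair' hgt' hmem' hlast' hfuel']
        simp only [gapCount, hg, Prod.mk.injEq]
        refine ⟨by split_ifs <;> omega, by split_ifs <;> omega, by split_ifs <;> omega⟩
      · have heq : prev + 3 = h := by omega
        have c1 := cmem (prev + 1) (by omega) (by omega)
        have c2 := cmem (prev + 2) (by omega) (by omega)
        simp only [part1Loop, if_pos hph2, heq, c1, c2, chit, if_true, Bool.false_eq_true,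
          if_false]
        rw [ih f h highest d1 d2 (d3+1) hprev' hpair' hgt' hmem' hlast' hfuel']
        simp only [gapCount, hg, Prod.mk.injEq]
        refine ⟨by split_ifs <;> omega, by split_ifs <;> omega, by split_ifs <;> omega⟩

-- in a strictly increasing list, every member is at most the last element
lemma le_getLast_of_pairwise_lt : ∀ (s : List Int), s.Pairwise (· < ·) →
    ∀ v ∈ s, ∀ (h : s ≠ []), v ≤ s.getLast h := by
  intro s
  induction s with
  | nil => intro _ v hv; cases hv
  | cons a t ih =>
    intro hpair v hv h
    cases t with
    | nil => simp at hv; simp [hv]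
    | cons b u =>
      rw [List.getLast_cons_cons]
      rcases List.mem_cons.mp hv with rfl | hm
      · have hb : v < b := (List.pairwise_cons.mp hpair).1 b (by simp)
        have := ih (List.pairwise_cons.mp hpair).2 b (by simp) (by simp)
        omega
      · exact ih (List.pairwise_cons.mp hpair).2 v hm (by simp)

theorem part1_spec_aux (data : List Int) (hpre : Pre_part1 data) :
    part1 data = part1_alt data := by
  obtain ⟨hne, HPdata⟩ := hpre
  -- the sorted distinct positives
  set s := PySem.List.sorted (PySem.Set.ofList (data.filter (fun x => decide (0 < x))))
            (fun x => x) false with hs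
  have spair : s.Pairwise (· < ·) := PySem.List.sorted_ofList_pairwise_lt _
  have smem : ∀ v : Int, v ∈ s ↔ v ∈ data ∧ 0 < v := by
    intro v
    rw [hs, PySem.List.mem_sorted, PySem.Set.mem_ofList, List.mem_filter]
    simp
  -- the membership set
  set vs := PySem.Set.ofList data with hvs
  have vsmem : ∀ v : Int, v ∈ vs ↔ v ∈ data := fun v => PySem.Set.mem_ofList data v
  have HP : ∀ x : Int, x ∈ vs → 3 < x → ∃ y ∈ vs, x - 3 ≤ y ∧ y < x := by
    intro x hx h3
    obtain ⟨y, hy, hy1, hy2⟩ := HPdata x ((vsmem x).mp hx) h3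
    exact ⟨y, (vsmem y).mpr hy, hy1, hy2⟩
  -- max
  obtain ⟨highest, hmax⟩ : ∃ m, PySem.List.max? data (fun x => x) = some m := by
    cases hm : PySem.List.max? data (fun x => x) with
    | none => exact absurd ((PySem.List.max?_eq_none_iff data (fun x => x)).mp hm) hne
    | some m => exact ⟨m, rfl⟩
  have hmaxmem : highest ∈ data := PySem.List.max?_mem hmax
  have hmaxub : ∀ y ∈ data, y ≤ highest := by
    intro y hy; exact PySem.List.max?_isMax hmax y hy
  have hmem0 : ∀ v : Int, (0:Int) < v → (v ∈ vs ↔ v ∈ s) := by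
    intro v hv; rw [vsmem, smem]; constructor
    · exact fun h => ⟨h, hv⟩
    · exact fun h => h.1
  unfold part1 part1_alt
  rw [hmax]
  simp only [← hs, ← hvs]
  rw [foldB_eq]
  by_cases hpos : ∃ x ∈ data, 0 < x
  · -- some positive adapter: highest > 0 and highest is the last of s
    obtain ⟨x, hx, hx0⟩ := hpos
    have hh0 : 0 < highest := lt_of_lt_of_le hx0 (hmaxub x hx)
    have hhs : highest ∈ s := (smem highest).mpr ⟨hmaxmem, hh0⟩
    have hsne : s ≠ [] := fun h => by simp [h] at hhs
    have hgt0 : ∀ v ∈ s, (0:Int) < v := fun v hv => ((smem v).mp hv).2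
    have hlastle : s.getLast hsne ≤ highest := by
      have := (smem (s.getLast hsne)).mp (List.getLast_mem hsne)
      exact hmaxub _ this.1
    have hlastge : highest ≤ s.getLast hsne :=
      le_getLast_of_pairwise_lt s spair highest hhs hsne
    have hlasteq : s.getLast hsne = highest := le_antisymm hlastle hlastge
    have hlast : highest = ((0:Int) :: s).getLast (by simp) := by
      rw [List.getLast_cons hsne, hlasteq]
    have hfuel : highest - 0 ≤ (highest.toNat : Int) := by omega
    rw [loopA_eq vs HP s highest.toNat 0 highest 0 0 0 le_rfl spair hgt0 hmem0 hlast hfuel]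
  · -- no positive adapter: s = [] and the loop never runs (fuel = 0)
    rw [not_exists] at hpos
    have hpos' : ∀ x ∈ data, x ≤ 0 := by
      intro a ha
      by_contra hlt
      exact hpos a ⟨ha, by omega⟩
    have hsnil : s = [] := by
      rw [hs, PySem.List.sorted_eq_nil_iff]
      have : data.filter (fun x => decide (0 < x)) = [] := by
        rw [List.filter_eq_nil_iff]
        intro a ha; simpa using hpos' a ha
      simp [this, PySem.Set.ofList_nil]
    have hh0 : highest ≤ 0 := hpos' highest hmaxmem
    have : highest.toNat = 0 := by omega
    rw [this]
    simp [part1Loop, hsnil, gapCount]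

-- ===== VERDICT (by name: the statement is the Claim_ definition above) =====
theorem part1_spec : Claim_equal_part1 := by
  intro data _ hpre
  unfold Spec_part1
  exact part1_spec_aux data hpre
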